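-- pv_equiv track=rewrite | github.com/ththarkonen/advent-of-code-2024 | day5/pages.py | constructOrdering
-- ===== SOURCE A (Python) =====
-- def constructOrdering( pageConditions ):
--
--     pageOrdering = {}
--
--     for condition in pageConditions:
--
--         left = condition[0]
--         right = condition[1]
--
--         if left in pageOrdering:
--             pageOrdering[left].append( right )
--         else:
--             pageOrdering[left] = [ right ]
--
--     return pageOrdering
-- ===== SOURCE B (Python) =====
-- def constructOrdering( pageConditions ):
--     lefts = dict.fromkeys( c[0] for c in pageConditions )
--     return { l: [ c[1] for c in pageConditions if c[0] == l ] for l in lefts }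
-- ===== Notes on version B (the rewrite author's own statement) =====
-- stated objective: alternative
-- what changed: Replaces the single accumulating pass (dict of growing lists) with a two-phase scheme: collect the distinct left keys in first-seen order with dict.fromkeys, then build each key's list by rescanning the conditions in a comprehension.
import Mathlib
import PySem

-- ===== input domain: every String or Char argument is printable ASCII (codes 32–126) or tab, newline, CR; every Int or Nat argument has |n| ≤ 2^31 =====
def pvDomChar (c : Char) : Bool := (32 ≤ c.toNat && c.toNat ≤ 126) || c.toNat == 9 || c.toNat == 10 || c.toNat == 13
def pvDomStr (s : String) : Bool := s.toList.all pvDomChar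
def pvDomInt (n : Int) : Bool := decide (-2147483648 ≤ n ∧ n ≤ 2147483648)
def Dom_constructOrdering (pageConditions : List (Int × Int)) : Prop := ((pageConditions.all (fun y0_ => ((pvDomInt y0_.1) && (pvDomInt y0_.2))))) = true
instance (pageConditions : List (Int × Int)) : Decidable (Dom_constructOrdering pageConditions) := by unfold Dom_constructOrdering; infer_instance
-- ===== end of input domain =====

-- ===== PORT A =====
-- B replaces A's single accumulating pass with distinct-keys-then-rescan per key (alternative decomposition, same result).
def constructOrdering (pageConditions : List (Int × Int)) : List (Int × List Int) :=
  (pageConditions.foldl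
    (fun pageOrdering condition =>
      let left := condition.1
      let right := condition.2
      if pageOrdering.contains left then
        pageOrdering.modify left [] (· ++ [right])
      else
        pageOrdering.insert left [right])
    PySem.Dict.empty).items

-- ===== PORT B =====
def constructOrdering_alt (pageConditions : List (Int × Int)) : List (Int × List Int) :=
  (PySem.Set.ofList (pageConditions.map (·.1))).map
    (fun l => (l, (pageConditions.filter (fun c => c.1 == l)).map (·.2)))

-- ===== PRECONDITION & SPEC =====
def Spec_constructOrdering (pageConditions : List (Int × Int)) (out : List (Int × List Int)) : Prop := out = constructOrdering_alt pageConditions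
instance (pageConditions : List (Int × Int)) (out : List (Int × List Int)) : Decidable (Spec_constructOrdering pageConditions out) := by unfold Spec_constructOrdering; infer_instance

-- ===== CLAIM (what is proved, stated in full; the proofs are below) =====
def Claim_equal_constructOrdering : Prop := ∀ (pageConditions : List (Int × Int)), Dom_constructOrdering pageConditions → Spec_constructOrdering pageConditions (constructOrdering pageConditions)

-- ===== LEMMAS AND PROOFS =====

lemma step_eq (d : PySem.Dict Int (List Int)) (c : Int × Int) :
    (if d.contains c.1 then d.modify c.1 [] (· ++ [c.2]) else d.insert c.1 [c.2])
      = d.modify c.1 [] (· ++ [c.2]) := by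
  by_cases h : d.contains c.1
  · simp [h]
  · have hg : d.get? c.1 = none := by
      rw [PySem.Dict.get?_eq_none_iff_contains]; simpa using h
    simp [h, PySem.Dict.modify, PySem.Dict.getD_eq_get?_getD, hg]

-- ===== VERDICT (by name: the statement is the Claim_ definition above) =====
theorem constructOrdering_spec : Claim_equal_constructOrdering := by
  intro pcs _
  unfold Spec_constructOrdering constructOrdering constructOrdering_alt
  have hf : (fun (d : PySem.Dict Int (List Int)) (c : Int × Int) =>
      let left := c.1
      let right := c.2
      if d.contains left then d.modify left [] (· ++ [right]) else d.insert left [right])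
      = (fun d c => d.modify c.1 [] (· ++ [c.2])) := by
    funext d c; exact step_eq d c
  rw [hf]
  have hnd : (pcs.foldl (fun d (c : Int × Int) => d.modify c.1 [] (· ++ [c.2]))
      PySem.Dict.empty).keys.Nodup := by
    exact PySem.Dict.nodup_keys_foldl_modify_key pcs (·.1) [] (fun d c => (· ++ [c.2]))
      PySem.Dict.empty (by simp)
  rw [PySem.Dict.items_eq_map_keys _ hnd []]
  have hk : (pcs.foldl (fun d (c : Int × Int) => d.modify c.1 [] (· ++ [c.2]))
      PySem.Dict.empty).keys = PySem.Set.ofList (pcs.map (·.1)) := by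
    rw [PySem.Dict.keys_foldl_modify_key]
    simp [PySem.Set.update_nil_left]
  rw [hk]
  refine List.map_congr_left (fun l hl => ?_)
  rw [PySem.Dict.getD_foldl_modify_append]
  simp
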